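-- pv_equiv track=rewrite | github.com/untxi/ada | Code/2_Patrones_ArMoon_Interfaz.py | suma2_ArMoon
-- ===== SOURCE A (Python) =====
-- def suma2_ArMoon(sumando1, sumando2):
--     """ Suma dos sumandos decimales en ArMoon
--         Entrada:
--             sumando1 y sumando2
--         Salidas:
--             resultado, resultado de la sumar ArMoon en decimal
--         Restricciones:
--             las entradas son enteros postivo
--     """
--     ## Restriciones
--     assert isinstance(sumando1, int) ##and sumando1 >= 0
--     assert isinstance(sumando2, int) ##and sumando2 >= 0
--     ## Ciclo para obtener la concatenación del resultado de la sumas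
--     resultado = ""
--     while sumando1 or sumando2:
--         result = ((sumando1 % 64) + (sumando2 % 64)) % 64
--         result = bin(result)
--         i, s = 2, ""
--         while i < len(result):
--             s += result[i]
--             i += 1
--         resultado = s.zfill(6) + resultado
--         sumando1 //= 64
--         sumando2 //= 64
--     resultado = resultado if str(resultado).isdigit() else "000000"
--     ## Salida
--     if resultado == "":
--         resultado = "0"
--     return int(resultado, 2)
-- ===== SOURCE B (Python) =====
-- def _digits64(n):
--     """Base-64 digits of n, least significant first (empty for 0)."""
--     ds = []
--     while n:
--         ds.append(n % 64)
--         n //= 64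
--     return ds
--
-- def suma2_ArMoon(sumando1, sumando2):
--     assert isinstance(sumando1, int)
--     assert isinstance(sumando2, int)
--     d1 = _digits64(sumando1)
--     d2 = _digits64(sumando2)
--     if len(d1) < len(d2):
--         d1 = d1 + [0] * (len(d2) - len(d1))
--     else:
--         d2 = d2 + [0] * (len(d1) - len(d2))
--     sums = [(x + y) % 64 for x, y in zip(d1, d2)]
--     resultado = 0
--     for d in reversed(sums):
--         resultado = resultado * 64 + d
--     return resultado
-- ===== Notes on version B (the rewrite author's own statement) =====
-- stated objective: simpler
-- what changed: B drops A's binary-string detour (build 6-bit zfilled groups, concatenate, re-parse with int(.,2)): it extracts the base-64 digit lists of both summands, adds them position-wise mod 64 with zero padding, and evaluates the digit list by Horner's rule, all in integer arithmetic.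
import Mathlib
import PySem

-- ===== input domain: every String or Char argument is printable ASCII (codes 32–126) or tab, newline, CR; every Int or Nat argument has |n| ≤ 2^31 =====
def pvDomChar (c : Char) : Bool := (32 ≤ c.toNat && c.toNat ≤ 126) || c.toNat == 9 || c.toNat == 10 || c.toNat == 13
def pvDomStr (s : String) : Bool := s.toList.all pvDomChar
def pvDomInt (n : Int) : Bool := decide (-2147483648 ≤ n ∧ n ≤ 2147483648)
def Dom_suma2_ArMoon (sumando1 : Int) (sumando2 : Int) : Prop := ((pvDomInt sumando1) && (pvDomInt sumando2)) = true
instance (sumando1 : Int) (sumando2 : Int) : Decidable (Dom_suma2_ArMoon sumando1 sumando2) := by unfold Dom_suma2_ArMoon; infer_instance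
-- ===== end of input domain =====

-- B replaces A's binary-string build-and-reparse with digit-list extraction,
-- position-wise mod-64 addition and a Horner fold (objective: simpler).
-- Both loops are ported with an ample fuel counter (100) standing for Python's
-- unbounded 'while' (on Dom_, nonnegative summands finish within 6 iterations;
-- on negative summands both Pythons loop forever, so nothing is claimed by a
-- return there): fuel only makes the ports total, and both ports burn it in
-- lock-step, so the equivalence is unconditional.


-- ===== PORT A =====
-- binary digits of a Nat, most significant first ([] for 0); fueled structural
-- recursion (fuel = the number itself always suffices: n/2 < n for n > 0)
def binRec : Nat → Nat → List Char
  | 0, _ => []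
  | f+1, n =>
    if n = 0 then [] else binRec f (n / 2) ++ [if n % 2 = 1 then '1' else '0']

-- Python bin(n), exact for n ≥ 0 (the only values it receives here)
def pyBin (n : Int) : List Char :=
  '0' :: 'b' :: (if n.toNat = 0 then ['0'] else binRec n.toNat n.toNat)

-- the inner while: i from 2, s += result[i]; fueled by the string length
def copyLoop : Nat → List Char → Nat → List Char → List Char
  | 0, _, _, s => s
  | f+1, result, i, s =>
    if h : i < result.length then copyLoop f result (i+1) (s ++ [result[i]]) else s

-- int(s, 2), ported by hand: exact on the strings parsed here (nonempty,
-- only '0'/'1' digits, no sign/whitespace/underscore)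
def parseBin (s : List Char) : Int :=
  s.foldl (fun acc c => 2 * acc + (if c = '1' then 1 else 0)) 0

-- the outer while loop, prepending each 6-char group
def loopA : Nat → Int → Int → List Char → List Char
  | 0, _, _, res => res
  | f+1, a, b, res =>
    if a ≠ 0 ∨ b ≠ 0 then
      let r := PySem.Int.mod (PySem.Int.mod a 64 + PySem.Int.mod b 64) 64
      let s := copyLoop (pyBin r).length (pyBin r) 2 []
      loopA f (PySem.Int.floordiv a 64) (PySem.Int.floordiv b 64)
        (PySem.Chars.zfill s 6 ++ res)
    else res

def suma2_ArMoon (sumando1 : Int) (sumando2 : Int) : Int :=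
  let resultado := loopA 100 sumando1 sumando2 []
  let resultado := if PySem.Chars.strIsdigit resultado then resultado else ['0','0','0','0','0','0']
  parseBin (if resultado = [] then ['0'] else resultado)

-- ===== PORT B =====
def digits64 : Nat → Int → List Int
  | 0, _ => []
  | f+1, n =>
    if n ≠ 0 then PySem.Int.mod n 64 :: digits64 f (PySem.Int.floordiv n 64) else []

-- the length-compare-and-pad followed by zip, as in Source B
def padZip (xs ys : List Int) : List (Int × Int) :=
  if xs.length < ys.length then
    (xs ++ List.replicate (ys.length - xs.length) 0).zip ys
  else
    xs.zip (ys ++ List.replicate (xs.length - ys.length) 0)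

def suma2_ArMoon_alt (sumando1 : Int) (sumando2 : Int) : Int :=
  let d1 := digits64 100 sumando1
  let d2 := digits64 100 sumando2
  let sums := (padZip d1 d2).map (fun p => PySem.Int.mod (p.1 + p.2) 64)
  sums.reverse.foldl (fun r d => r * 64 + d) 0

-- ===== PRECONDITION & SPEC =====
def Spec_suma2_ArMoon (sumando1 : Int) (sumando2 : Int) (out : Int) : Prop := out = suma2_ArMoon_alt sumando1 sumando2
instance (sumando1 : Int) (sumando2 : Int) (out : Int) : Decidable (Spec_suma2_ArMoon sumando1 sumando2 out) := by unfold Spec_suma2_ArMoon; infer_instance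

-- ===== CLAIM (what is proved, stated in full; the proofs are below) =====
def Claim_equal_suma2_ArMoon : Prop := ∀ (sumando1 : Int) (sumando2 : Int), Dom_suma2_ArMoon sumando1 sumando2 → Spec_suma2_ArMoon sumando1 sumando2 (suma2_ArMoon sumando1 sumando2)

-- ===== LEMMAS AND PROOFS =====

-- common value both ports compute: Σ ((aᵢ+bᵢ) mod 64)·64^i over fuel-many digits
def specSum : Nat → Int → Int → Int
  | 0, _, _ => 0
  | f+1, a, b =>
    if a ≠ 0 ∨ b ≠ 0 then
      PySem.Int.mod (PySem.Int.mod a 64 + PySem.Int.mod b 64) 64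
        + 64 * specSum f (PySem.Int.floordiv a 64) (PySem.Int.floordiv b 64)
    else 0

-- the per-iteration 6-char group
def groupOf (r : Int) : List Char :=
  PySem.Chars.zfill (copyLoop (pyBin r).length (pyBin r) 2 []) 6

lemma groupOf_facts : ∀ k : Fin 64,
    (groupOf (k : Int)).length = 6 ∧ parseBin (groupOf (k : Int)) = (k : Int) ∧
    (groupOf (k : Int)).all (fun c => c == '0' || c == '1') = true := by decide

lemma mod64_fin (a b : Int) :
    ∃ k : Fin 64, PySem.Int.mod (PySem.Int.mod a 64 + PySem.Int.mod b 64) 64 = (k : Int) := by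
  have h1 := PySem.Int.mod_nonneg (PySem.Int.mod a 64 + PySem.Int.mod b 64) (b := 64) (by norm_num)
  have h2 := PySem.Int.mod_lt (PySem.Int.mod a 64 + PySem.Int.mod b 64) (b := 64) (by norm_num)
  refine ⟨⟨(PySem.Int.mod (PySem.Int.mod a 64 + PySem.Int.mod b 64) 64).toNat, by omega⟩, by simp; omega⟩

lemma parseBin_shift (l : List Char) (acc : Int) :
    l.foldl (fun acc c => 2 * acc + (if c = '1' then 1 else 0)) acc
      = acc * 2 ^ l.length + parseBin l := by
  induction l generalizing acc with
  | nil => simp [parseBin]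
  | cons c l ih =>
    simp only [List.foldl_cons, parseBin, List.length_cons]
    rw [ih, ih (2 * 0 + _)]
    ring

lemma parseBin_append (x y : List Char) :
    parseBin (x ++ y) = parseBin x * 2 ^ y.length + parseBin y := by
  unfold parseBin
  rw [List.foldl_append, parseBin_shift]
  rfl

lemma loopA_append (f : Nat) : ∀ (a b : Int) (res : List Char),
    loopA f a b res = loopA f a b [] ++ res := by
  induction f with
  | zero => intro a b res; simp [loopA]
  | succ f ih =>
    intro a b res
    by_cases h : a ≠ 0 ∨ b ≠ 0
    · simp only [loopA, if_pos h]
      rw [ih _ _ (PySem.Chars.zfill _ 6 ++ res), ih _ _ (PySem.Chars.zfill _ 6 ++ [])]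
      simp
    · simp [loopA, if_neg h]

lemma parseBin_loopA (f : Nat) : ∀ a b : Int,
    parseBin (loopA f a b []) = specSum f a b := by
  induction f with
  | zero => intro a b; simp [loopA, specSum, parseBin]
  | succ f ih =>
    intro a b
    by_cases h : a ≠ 0 ∨ b ≠ 0
    · simp only [loopA, specSum, if_pos h]
      rw [loopA_append, parseBin_append]
      obtain ⟨k, hk⟩ := mod64_fin a b
      obtain ⟨hlen, hval, _⟩ := groupOf_facts k
      have hg : PySem.Chars.zfill
          (copyLoop (pyBin (PySem.Int.mod (PySem.Int.mod a 64 + PySem.Int.mod b 64) 64)).length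
            (pyBin (PySem.Int.mod (PySem.Int.mod a 64 + PySem.Int.mod b 64) 64)) 2 []) 6 ++ []
          = groupOf (k : Int) := by
        rw [List.append_nil, ← hk]; rfl
      rw [hg, hlen, hval, ih, hk]
      ring
    · simp [loopA, specSum, if_neg h, parseBin]

lemma loopA_good (f : Nat) : ∀ (a b : Int) (res : List Char),
    (∀ c ∈ res, c = '0' ∨ c = '1') →
    ∀ c ∈ loopA f a b res, c = '0' ∨ c = '1' := by
  induction f with
  | zero => intro a b res hres; simpa [loopA] using hres
  | succ f ih =>
    intro a b res hres
    by_cases h : a ≠ 0 ∨ b ≠ 0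
    · simp only [loopA, if_pos h]
      apply ih
      intro c hc
      rcases List.mem_append.mp hc with hg | hr
      · obtain ⟨k, hk⟩ := mod64_fin a b
        have hg' : c ∈ groupOf (k : Int) := by
          unfold groupOf; rw [← hk]; exact hg
        simpa using List.all_eq_true.mp (groupOf_facts k).2.2 c hg'
      · exact hres c hr
    · simp only [loopA, if_neg h]; exact hres

lemma loopA_01_isdigit (f : Nat) (a b : Int) (hne : loopA f a b [] ≠ []) :
    PySem.Chars.strIsdigit (loopA f a b []) = true := by
  have hgood := loopA_good f a b [] (by simp)
  rw [PySem.Chars.strIsdigit]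
  have h1 : (loopA f a b []).isEmpty = false := by
    rcases hl : loopA f a b [] with _ | ⟨c, l⟩
    · exact absurd hl hne
    · simp
  rw [h1]
  simp only [Bool.not_false, Bool.true_and]
  apply List.all_eq_true.mpr
  intro c hc
  rcases hgood c hc with h | h <;> rw [h] <;> decide

-- A's port equals specSum 100
lemma portA_spec (a b : Int) : suma2_ArMoon a b = specSum 100 a b := by
  have hp := parseBin_loopA 100 a b
  by_cases h : loopA 100 a b [] = []
  · rw [h] at hp
    simp only [parseBin, List.foldl_nil] at hp
    simp only [suma2_ArMoon, h, ← hp]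
    decide
  · have hdig := loopA_01_isdigit 100 a b h
    simp only [suma2_ArMoon, hdig, if_true, if_neg h]
    exact hp

-- padZip cons equations
lemma padZip_nil_cons (y : Int) (ys : List Int) :
    padZip [] (y :: ys) = (0, y) :: padZip [] ys := by
  simp [padZip, List.replicate_succ]

lemma padZip_cons_nil (x : Int) (xs : List Int) :
    padZip (x :: xs) [] = (x, 0) :: padZip xs [] := by
  simp [padZip, List.replicate_succ]

lemma padZip_cons_cons (x y : Int) (xs ys : List Int) :
    padZip (x :: xs) (y :: ys) = (x, y) :: padZip xs ys := by
  unfold padZip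
  by_cases h : xs.length < ys.length
  · rw [if_pos (by simpa using h), if_pos h]
    simp [List.length_cons, Nat.succ_sub_succ]
  · rw [if_neg (by simpa using h), if_neg h]
    simp [List.length_cons, Nat.succ_sub_succ]

lemma digits64_zero (f : Nat) : digits64 f 0 = [] := by
  cases f <;> simp [digits64]

-- the key step: head/tail shape of the padded zip of the two digit lists
lemma padZip_digits_step (f : Nat) (a b : Int) (h : a ≠ 0 ∨ b ≠ 0) :
    padZip (digits64 (f+1) a) (digits64 (f+1) b)
      = (PySem.Int.mod a 64, PySem.Int.mod b 64)
        :: padZip (digits64 f (PySem.Int.floordiv a 64)) (digits64 f (PySem.Int.floordiv b 64)) := by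
  have h64 : PySem.Int.floordiv (0:Int) 64 = 0 := by decide
  have hm : PySem.Int.mod (0:Int) 64 = 0 := by decide
  by_cases ha : a = 0
  · have hb : b ≠ 0 := by tauto
    subst ha
    simp only [digits64, if_pos hb, if_neg (by simp : ¬ (0:Int) ≠ 0)]
    rw [padZip_nil_cons, hm, h64, digits64_zero f]
  · by_cases hb : b = 0
    · subst hb
      simp only [digits64, if_pos ha, if_neg (by simp : ¬ (0:Int) ≠ 0)]
      rw [padZip_cons_nil, hm, h64, digits64_zero f]
    · simp only [digits64, if_pos ha, if_pos hb]
      rw [padZip_cons_cons]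

lemma horner_cons (x : Int) (l : List Int) :
    (x :: l).reverse.foldl (fun r d => r * 64 + d) 0
      = 64 * l.reverse.foldl (fun r d => r * 64 + d) 0 + x := by
  rw [List.reverse_cons, List.foldl_append]
  simp [Int.mul_comm]

lemma portB_sum (f : Nat) : ∀ a b : Int,
    ((padZip (digits64 f a) (digits64 f b)).map
        (fun p => PySem.Int.mod (p.1 + p.2) 64)).reverse.foldl (fun r d => r * 64 + d) 0
      = specSum f a b := by
  induction f with
  | zero => intro a b; simp [digits64, padZip, specSum]
  | succ f ih =>
    intro a b
    by_cases h : a ≠ 0 ∨ b ≠ 0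
    · rw [padZip_digits_step f a b h, List.map_cons, horner_cons, ih]
      simp only [specSum, if_pos h]
      ring
    · have ha : a = 0 := by tauto
      have hb : b = 0 := by tauto
      subst ha; subst hb
      simp [digits64, padZip, specSum]

lemma portB_spec (a b : Int) : suma2_ArMoon_alt a b = specSum 100 a b := by
  unfold suma2_ArMoon_alt
  exact portB_sum 100 a b

-- ===== VERDICT (by name: the statement is the Claim_ definition above) =====
theorem suma2_ArMoon_spec : Claim_equal_suma2_ArMoon := by
  intro a b _
  unfold Spec_suma2_ArMoon
  rw [portA_spec, portB_spec]
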